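-- pv_equiv track=rewrite | github.com/WendyMYALE/SublinearArmstrongTable | FunctionSet.py | MatchSize
-- ===== SOURCE A (Python) =====
-- def MatchSize(a, b):
--     r = -1
--
--     for i in a.split('~'):
--         if i in b:
--             r += 1
--         else:
--             r = 0
--             break
--
--     return r
-- ===== SOURCE B (Python) =====
-- def MatchSize(a, b):
--     # Fused tokenizer/tester: one character-level scan of a (no split());
--     # the current token is built in place and tested at each '~' boundary
--     # and at the end; the result is the number of separators passed.
--     cur = []
--     seps = 0
--     for c in a:
--         if c == '~':
--             if ''.join(cur) not in b:
--                 return 0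
--             cur = []
--             seps += 1
--         else:
--             cur.append(c)
--     return seps if ''.join(cur) in b else 0
-- ===== Notes on version B (the rewrite author's own statement) =====
-- stated objective: alternative
-- what changed: Replaces split('~') plus a counting loop over the token list by a single fused character-level scan that builds each token in place, tests it at every '~' boundary, and returns the number of separators passed.
import Mathlib
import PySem

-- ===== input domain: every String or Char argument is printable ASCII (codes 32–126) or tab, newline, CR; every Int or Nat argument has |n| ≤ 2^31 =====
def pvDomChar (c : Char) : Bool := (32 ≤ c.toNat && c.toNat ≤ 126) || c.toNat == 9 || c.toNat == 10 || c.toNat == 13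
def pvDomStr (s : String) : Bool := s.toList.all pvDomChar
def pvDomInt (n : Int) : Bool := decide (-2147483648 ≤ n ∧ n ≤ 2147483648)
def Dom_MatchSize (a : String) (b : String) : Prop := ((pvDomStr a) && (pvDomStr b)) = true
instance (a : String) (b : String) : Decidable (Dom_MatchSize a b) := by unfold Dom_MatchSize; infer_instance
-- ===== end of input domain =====

-- B replaces split('~') + a counting loop over the token list by one fused
-- character-level scan that builds each token in place, tests it at its '~'
-- boundary, and returns the number of separators passed (objective: alternative).

-- ===== PORT A =====
-- loop over the split tokens with accumulator r; the else-branch returns 0 (the break)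
def MatchSizeLoop (b : String) : List String → Int → Int
  | [], r => r
  | t :: ts, r => if PySem.Str.isIn t b then MatchSizeLoop b ts (r + 1) else 0

def MatchSize (a : String) (b : String) : Int :=
  MatchSizeLoop b ((PySem.Chars.splitOn a.toList ['~']).map String.ofList) (-1)

-- ===== PORT B =====
-- the scan loop with state (cur, seps); on '~' or end test cur against b, count separators
def MatchSizeAltGo (b : String) : List Char → List Char → Int → Int
  | [], cur, seps => if PySem.Chars.isIn cur b.toList then seps else 0
  | c :: rest, cur, seps =>
      if c = '~' then
        (if PySem.Chars.isIn cur b.toList then MatchSizeAltGo b rest [] (seps + 1) else 0)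
      else MatchSizeAltGo b rest (cur ++ [c]) seps

def MatchSize_alt (a : String) (b : String) : Int :=
  MatchSizeAltGo b a.toList [] 0

-- ===== PRECONDITION & SPEC =====
def Spec_MatchSize (a : String) (b : String) (out : Int) : Prop := out = MatchSize_alt a b
instance (a : String) (b : String) (out : Int) : Decidable (Spec_MatchSize a b out) := by unfold Spec_MatchSize; infer_instance

-- ===== CLAIM =====
def Claim_equal_MatchSize : Prop := ∀ (a : String) (b : String), Dom_MatchSize a b → Spec_MatchSize a b (MatchSize a b)

-- ===== LEMMAS AND PROOFS =====

-- a structural single-'~' splitter used only in the proofs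
def pfSplit : List Char → List (List Char)
  | [] => [[]]
  | c :: cs =>
      if c = '~' then [] :: pfSplit cs
      else
        match pfSplit cs with
        | [] => [[c]]
        | t :: ts => (c :: t) :: ts

def pfPrepend (p : List Char) : List (List Char) → List (List Char)
  | [] => [p]
  | t :: ts => (p ++ t) :: ts

lemma pfSplit_ne_nil (cs : List Char) : pfSplit cs ≠ [] := by
  cases cs with
  | nil => simp [pfSplit]
  | cons c cs =>
    simp only [pfSplit]
    split
    · simp
    · split <;> simp

lemma splitOn_go_eq (acc : List (List Char)) (cur l : List Char) (fuel : Nat)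
    (h : l.length < fuel) :
    PySem.Chars.splitOn.go ['~'] fuel l cur acc
      = acc.reverse ++ pfPrepend cur.reverse (pfSplit l) := by
  induction fuel generalizing l cur acc with
  | zero => omega
  | succ f ih =>
    cases l with
    | nil =>
      simp [PySem.Chars.splitOn.go, pfSplit, pfPrepend]
    | cons c rest =>
      simp only [PySem.Chars.splitOn.go]
      by_cases hc : c = '~'
      · subst hc
        simp only [List.isPrefixOf, beq_self_eq_true, Bool.true_and, if_pos]
        have hdrop : List.drop (['~'].length) ('~' :: rest) = rest := rfl
        rw [hdrop, ih (acc := (cur.reverse :: acc)) (cur := []) (l := rest)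
            (by simpa using Nat.lt_of_succ_lt_succ h)]
        have hne := pfSplit_ne_nil rest
        cases hs : pfSplit rest with
        | nil => exact absurd hs hne
        | cons t ts => simp [pfSplit, pfPrepend, hs]
      · have : List.isPrefixOf ['~'] (c :: rest) = false := by
          simp [List.isPrefixOf]; exact fun h' => absurd h'.symm hc
        rw [if_neg (by simp [this])]
        rw [ih (acc := acc) (cur := c :: cur) (l := rest)
            (Nat.lt_of_succ_lt_succ h)]
        have hne := pfSplit_ne_nil rest
        cases hs : pfSplit rest with
        | nil => exact absurd hs hne
        | cons t ts => simp [pfSplit, pfPrepend, hs, hc]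

lemma splitOn_eq_pfSplit (s : List Char) :
    PySem.Chars.splitOn s ['~'] = pfSplit s := by
  unfold PySem.Chars.splitOn
  rw [splitOn_go_eq [] [] s (s.length + 1) (by omega)]
  have hne := pfSplit_ne_nil s
  cases hs : pfSplit s with
  | nil => exact absurd hs hne
  | cons t ts => simp [pfPrepend]

-- the A-side loop on char-list tokens
def pfLoopC (b : String) : List (List Char) → Int → Int
  | [], r => r
  | t :: ts, r => if PySem.Chars.isIn t b.toList then pfLoopC b ts (r + 1) else 0

lemma loop_map_eq (b : String) (ts : List (List Char)) (r : Int) :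
    MatchSizeLoop b (ts.map String.ofList) r = pfLoopC b ts r := by
  induction ts generalizing r with
  | nil => simp [MatchSizeLoop, pfLoopC]
  | cons t ts ih =>
    simp [MatchSizeLoop, pfLoopC, PySem.Str.isIn, ih]

lemma altGo_eq (b : String) (chars cur : List Char) (seps : Int) :
    MatchSizeAltGo b chars cur seps
      = pfLoopC b (pfPrepend cur (pfSplit chars)) (seps - 1) := by
  induction chars generalizing cur seps with
  | nil =>
    simp only [MatchSizeAltGo, pfSplit, pfPrepend, pfLoopC, List.append_nil]
    split_ifs <;> omega
  | cons c rest ih =>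
    have hne := pfSplit_ne_nil rest
    obtain ⟨t, ts, hs⟩ : ∃ t ts, pfSplit rest = t :: ts := by
      cases h' : pfSplit rest with
      | nil => exact absurd h' hne
      | cons t ts => exact ⟨t, ts, rfl⟩
    simp only [MatchSizeAltGo]
    by_cases hc : c = '~'
    · subst hc
      rw [if_pos rfl]
      have hrhs : pfPrepend cur (pfSplit ('~' :: rest)) = cur :: t :: ts := by
        simp [pfSplit, hs, pfPrepend]
      rw [hrhs]
      rw [show pfLoopC b (cur :: t :: ts) (seps - 1)
            = if PySem.Chars.isIn cur b.toList then pfLoopC b (t :: ts) (seps - 1 + 1) else 0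
          from rfl]
      rw [show seps - 1 + 1 = seps from by ring]
      by_cases hcur : PySem.Chars.isIn cur b.toList
      · rw [if_pos hcur, if_pos hcur, ih, hs]
        rw [show pfPrepend [] (t :: ts) = t :: ts from by simp [pfPrepend]]
        rw [show seps + 1 - 1 = seps from by ring]
      · rw [if_neg hcur, if_neg hcur]
    · rw [if_neg hc, ih]
      simp [pfSplit, hs, hc, pfPrepend, List.append_assoc]

-- ===== VERDICT =====
theorem MatchSize_spec : Claim_equal_MatchSize := by
  intro a b _
  unfold Spec_MatchSize MatchSize MatchSize_alt
  rw [splitOn_eq_pfSplit, loop_map_eq, altGo_eq]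
  have hne := pfSplit_ne_nil a.toList
  cases hs : pfSplit a.toList with
  | nil => exact absurd hs hne
  | cons t ts =>
    rw [show pfPrepend [] (t :: ts) = t :: ts from by simp [pfPrepend],
      show (0 : Int) - 1 = -1 from by ring]
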